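-- pv_equiv track=rewrite | github.com/steve5535/programmers-code | Python3/프로그래머스/0/181925. 수 조작하기 2/수 조작하기 2.py | solution
-- ===== SOURCE A (Python) =====
-- def solution(numLog):
--     answer = ''
--     n = numLog[0]
--     for i in range(1, len(numLog)):
--         if numLog[i] == n + 1:
--             answer += "w"
--             n += 1
--         elif numLog[i] == n - 1:
--             answer += "s"
--             n -= 1
--         elif numLog[i] == n + 10:
--             answer += "d"
--             n += 10
--         else:
--             answer += "a"
--             n -= 10
--     return answer
-- ===== SOURCE B (Python) =====
-- def solution(numLog):
--     # Stage 1: reconstruct the cursor's state sequence (clamp each observed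
--     # difference to a legal move delta; anything illegal acts like 'a' = -10).
--     states = [numLog[0]]
--     for x in numLog[1:]:
--         p = states[-1]
--         d = x - p
--         states.append(p + (d if d in (1, -1, 10) else -10))
--     # Stage 2: stateless map from (previous-state, value) pairs to key chars.
--     keymap = {1: 'w', -1: 's', 10: 'd'}
--     return ''.join(keymap.get(x - p, 'a') for p, x in zip(states, numLog[1:]))
-- ===== Notes on version B (the rewrite author's own statement) =====
-- stated objective: alternative
-- what changed: Splits A's single pass with a mutable scalar/string accumulator and four-branch cascade into two staged passes: first reconstruct the full state sequence (clamping each difference arithmetically), then a stateless zip/map from (previous-state, value) pairs to characters joined at the end.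
-- outside the precondition, e.g. on solution([]): A raises IndexError, B raises IndexError
import Mathlib
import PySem

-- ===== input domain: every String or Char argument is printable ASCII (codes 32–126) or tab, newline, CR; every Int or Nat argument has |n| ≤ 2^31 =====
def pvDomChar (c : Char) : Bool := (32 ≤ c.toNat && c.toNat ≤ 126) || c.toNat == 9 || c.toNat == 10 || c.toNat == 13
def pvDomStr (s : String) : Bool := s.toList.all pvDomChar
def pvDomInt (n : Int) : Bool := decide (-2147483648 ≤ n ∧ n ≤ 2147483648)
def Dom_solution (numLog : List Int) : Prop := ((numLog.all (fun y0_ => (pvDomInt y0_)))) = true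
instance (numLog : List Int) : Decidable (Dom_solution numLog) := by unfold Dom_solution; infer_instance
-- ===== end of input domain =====

-- B splits A's single mutable-accumulator pass into two staged passes: reconstruct the
-- state sequence (arithmetic clamp), then a stateless zip/map to characters (alternative, same cost).


-- ===== PORT A =====
-- literal transliteration: answer/n accumulator, loop over range(1, len(numLog)),
-- indexed access numLog[i] (always in range here, so pyGetD), the four-branch cascade.
def solution (numLog : List Int) : String :=
  match numLog with
  | [] => ""  -- A raises IndexError on numLog[0] here; excluded by Pre_solution
  | n0 :: _ =>
    ((PySem.List.pyRange 1 (PySem.List.len numLog)).foldl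
      (fun (st : String × Int) i =>
        let x := PySem.List.pyGetD numLog i 0
        if x = st.2 + 1 then (st.1 ++ "w", st.2 + 1)
        else if x = st.2 - 1 then (st.1 ++ "s", st.2 - 1)
        else if x = st.2 + 10 then (st.1 ++ "d", st.2 + 10)
        else (st.1 ++ "a", st.2 - 10)) ("", n0)).1

-- ===== PORT B =====
-- B's lookup table keymap = {1: 'w', -1: 's', 10: 'd'}
def pvKey : PySem.Dict Int String :=
  PySem.Dict.ofList [(1, "w"), (-1, "s"), (10, "d")]

-- literal transliteration of B: stage 1 builds the states list by appending
-- (states[-1] ported as pyGet? st (-1); st is never empty, so .getD 0 never fires);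
-- stage 2 maps zip(states, numLog[1:]) to chars and joins.
def solution_alt (numLog : List Int) : String :=
  match numLog with
  | [] => ""  -- B raises IndexError on numLog[0] here; excluded by Pre_solution
  | n0 :: rest =>
    let states := rest.foldl
      (fun (st : List Int) x =>
        let p := (PySem.List.pyGet? st (-1)).getD 0
        let d := x - p
        st ++ [p + (if d = 1 ∨ d = -1 ∨ d = 10 then d else -10)]) [n0]
    PySem.Str.join "" ((states.zip rest).map (fun pr => (pvKey.get? (pr.2 - pr.1)).getD "a"))

-- ===== PRECONDITION & SPEC =====
-- Pre_ excludes only the empty list, on which both A and B raise IndexError at numLog[0].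
def Pre_solution (numLog : List Int) : Prop := numLog ≠ []
instance (numLog : List Int) : Decidable (Pre_solution numLog) := by unfold Pre_solution; infer_instance
def pvWitness_solution : List Int := ([10, 11, 1, 2])

def Spec_solution (numLog : List Int) (out : String) : Prop := out = solution_alt numLog
instance (numLog : List Int) (out : String) : Decidable (Spec_solution numLog out) := by unfold Spec_solution; infer_instance

-- ===== CLAIM (what is proved, stated in full; the proofs are below) =====
def Claim_equal_solution : Prop := ∀ (numLog : List Int), Dom_solution numLog → Pre_solution numLog → Spec_solution numLog (solution numLog)

-- ===== LEMMAS AND PROOFS =====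

-- proof-side abbreviations for the step functions of the two ports
def pvStepA (st : String × Int) (x : Int) : String × Int :=
  if x = st.2 + 1 then (st.1 ++ "w", st.2 + 1)
  else if x = st.2 - 1 then (st.1 ++ "s", st.2 - 1)
  else if x = st.2 + 10 then (st.1 ++ "d", st.2 + 10)
  else (st.1 ++ "a", st.2 - 10)

def pvClamp (d : Int) : Int := if d = 1 ∨ d = -1 ∨ d = 10 then d else -10

def pvStepS (st : List Int) (x : Int) : List Int :=
  let p := (PySem.List.pyGet? st (-1)).getD 0
  st ++ [p + pvClamp (x - p)]

def pvChar (p x : Int) : String := ((pvKey.get? (x - p)).getD "a")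

-- the state sequence, written as a plain recursion (proof-side)
def pvScan (n : Int) : List Int → List Int
  | [] => []
  | x :: r => (n + pvClamp (x - n)) :: pvScan (n + pvClamp (x - n)) r

-- ''.join distributes over cons
theorem pv_join_cons (c : String) (l : List String) :
    PySem.Str.join "" (c :: l) = c ++ PySem.Str.join "" l := by
  cases l with
  | nil => simp [PySem.Str.join, PySem.Chars.join, List.intercalate]
  | cons d l => simp [PySem.Str.join, PySem.Chars.join_cons_cons]

-- one step of A appends exactly B's character and advances n by the clamped difference
theorem pv_stepA_eq (s : String) (n x : Int) :
    pvStepA (s, n) x = (s ++ pvChar n x, n + pvClamp (x - n)) := by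
  have hit : pvKey.items = [(1, "w"), (-1, "s"), (10, "d")] := rfl
  by_cases h1 : x = n + 1
  · subst h1
    have hx : n + 1 - n = (1:Int) := by ring
    unfold pvStepA pvChar pvClamp
    rw [if_pos rfl, hx]
    simp [PySem.Dict.get?, hit]
  · by_cases h2 : x = n - 1
    · subst h2
      have hx : n - 1 - n = (-1:Int) := by ring
      unfold pvStepA pvChar pvClamp
      rw [if_neg h1, if_pos rfl, hx]
      simp [PySem.Dict.get?, hit, sub_eq_add_neg]
    · by_cases h3 : x = n + 10
      · subst h3
        have hx : n + 10 - n = (10:Int) := by ring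
        unfold pvStepA pvChar pvClamp
        rw [if_neg h1, if_neg h2, if_pos rfl, hx]
        simp [PySem.Dict.get?, hit]
      · unfold pvStepA pvChar pvClamp
        rw [if_neg h1, if_neg h2, if_neg h3,
            if_neg (by omega : ¬(x - n = 1 ∨ x - n = -1 ∨ x - n = 10))]
        have e1' : ((1:Int) == x + -n) = false := by simp; omega
        have e2' : ((-1:Int) == x + -n) = false := by simp; omega
        have e3' : ((10:Int) == x + -n) = false := by simp; omega
        simp [PySem.Dict.get?, hit, e1', e2', e3', sub_eq_add_neg]

-- stage 1 of B computes pvScan: the fold appends exactly the scan of the remaining list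
theorem pv_foldS_eq (rest : List Int) (l : List Int) (n : Int) :
    rest.foldl pvStepS (l ++ [n]) = l ++ [n] ++ pvScan n rest := by
  induction rest generalizing l n with
  | nil => simp [pvScan]
  | cons x r ih =>
      simp only [List.foldl_cons]
      have hlast : pvStepS (l ++ [n]) x = (l ++ [n]) ++ [n + pvClamp (x - n)] := by
        simp [pvStepS, PySem.List.pyGet?_neg_one_append_singleton]
      rw [hlast, ih (l ++ [n]) (n + pvClamp (x - n))]
      simp [pvScan]

-- main invariant: A's fold yields the join of B's zip/map over the scan states
theorem pv_fold_main (rest : List Int) (n : Int) (s : String) :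
    (rest.foldl pvStepA (s, n)).1
      = s ++ PySem.Str.join "" (((n :: pvScan n rest).zip rest).map
          (fun pr => pvChar pr.1 pr.2)) := by
  induction rest generalizing n s with
  | nil => simp [PySem.Str.join, PySem.Chars.join, List.intercalate]
  | cons x r ih =>
      simp only [List.foldl_cons, pv_stepA_eq, pvScan, List.zip_cons_cons, List.map_cons]
      rw [ih, pv_join_cons, ← String.append_assoc]

-- ===== VERDICT (by name: the statement is the Claim_ definition above) =====
theorem solution_spec : Claim_equal_solution := by
  intro numLog _ hpre
  unfold Spec_solution
  match numLog with
  | [] => exact absurd rfl hpre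
  | n0 :: rest =>
    have hA : solution (n0 :: rest)
        = ((PySem.List.pyRange 1 (PySem.List.len (n0 :: rest))).foldl
            (fun st i => pvStepA st (PySem.List.pyGetD (n0 :: rest) i 0)) ("", n0)).1 := rfl
    have hB : solution_alt (n0 :: rest)
        = PySem.Str.join "" (((rest.foldl pvStepS [n0]).zip rest).map
            (fun pr => pvChar pr.1 pr.2)) := rfl
    rw [hA, hB]
    have hlen : PySem.List.len (n0 :: rest) = ((n0 :: rest).length : Int) := by
      simp [PySem.List.len]
    rw [hlen,
      PySem.List.foldl_pyRange_pyGetD' (n0 :: rest) 0 pvStepA (("", n0) : String × Int)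
        (a := 1) (by norm_num)]
    simp only [Int.toNat_one, List.drop_one, List.tail_cons]
    have hS : rest.foldl pvStepS [n0] = n0 :: pvScan n0 rest := by
      have := pv_foldS_eq rest [] n0
      simpa using this
    rw [hS, pv_fold_main rest n0 ""]
    simp
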